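-- pv_equiv track=rewrite | github.com/raphaeltournafond/binomial-random-walk | random_walk.py | _compute_values
-- ===== SOURCE A (Python) =====
-- def _compute_values(stopping_points: list):
--     """
--     Generate x-axis values dictionnary with their reached times number
--     :param stopping_points: unsorted stopping points result for each outer run
--     :return: dictionnary of stop point -> number time reached
--     """
--     values = {}
--     stopping_points.sort()
--     for point in stopping_points:
--         if point in values:
--             values[point] += 1
--         else:
--             values[point] = 1
--     return values
-- ===== SOURCE B (Python) =====
-- from itertools import groupby
--
--
-- def _compute_values(stopping_points: list):
--     """Same result as A: sort in place (same observable mutation), then count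
--     each run of adjacent equal values with groupby instead of a dict-lookup loop."""
--     stopping_points.sort()
--     return {key: sum(1 for _ in grp) for key, grp in groupby(stopping_points)}
-- ===== Notes on version B (the rewrite author's own statement) =====
-- stated objective: idiomatic
-- what changed: Replaces the membership-test/dict-update accumulator loop by grouping the adjacent equal values of the sorted list with itertools.groupby and counting each run, relying on sortedness instead of repeated dict lookups; the in-place sort (argument mutation) is kept.
import Mathlib
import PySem

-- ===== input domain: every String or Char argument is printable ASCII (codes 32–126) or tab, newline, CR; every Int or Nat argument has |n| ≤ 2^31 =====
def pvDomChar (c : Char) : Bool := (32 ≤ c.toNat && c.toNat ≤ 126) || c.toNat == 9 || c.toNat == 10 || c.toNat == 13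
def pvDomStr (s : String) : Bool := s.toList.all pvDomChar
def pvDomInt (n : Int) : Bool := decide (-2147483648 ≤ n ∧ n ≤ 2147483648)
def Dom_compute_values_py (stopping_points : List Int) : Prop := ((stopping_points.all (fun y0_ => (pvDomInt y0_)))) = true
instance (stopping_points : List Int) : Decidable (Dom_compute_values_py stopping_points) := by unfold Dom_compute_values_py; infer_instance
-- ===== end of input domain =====

-- B replaces A's dict-membership counting loop by run-length grouping of the sorted list
-- (itertools.groupby); same return value, and B keeps A's in-place sort of the argument.


-- ===== PORT A =====
-- values = {}; stopping_points.sort(); for point: if point in values: +=1 else =1; return values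
def compute_values_py (stopping_points : List Int) : List (Int × Int) :=
  let sorted := PySem.List.sorted stopping_points (fun x => x) false
  (sorted.foldl
    (fun (values : PySem.Dict Int Int) point =>
      if values.contains point then values.insert point (values.getD point 0 + 1)
      else values.insert point 1)
    PySem.Dict.empty).items

-- ===== PORT B =====
-- groupby over the sorted list: one (key, run-length) pair per maximal run of equal values
def pvGroups : List Int → List (Int × Int)
  | [] => []
  | x :: xs =>
    (x, 1 + ((xs.takeWhile (fun y => y == x)).length : Int)) ::
      pvGroups (xs.dropWhile (fun y => y == x))
termination_by l => l.length
decreasing_by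
  simp only [List.length_cons]
  exact Nat.lt_succ_of_le (List.length_dropWhile_le _ _)

def compute_values_py_alt (stopping_points : List Int) : List (Int × Int) :=
  pvGroups (PySem.List.sorted stopping_points (fun x => x) false)

-- ===== PRECONDITION & SPEC =====
def Spec_compute_values_py (stopping_points : List Int) (out : List (Int × Int)) : Prop := out = compute_values_py_alt stopping_points
instance (stopping_points : List Int) (out : List (Int × Int)) : Decidable (Spec_compute_values_py stopping_points out) := by unfold Spec_compute_values_py; infer_instance

-- ===== CLAIM (what is proved, stated in full; the proofs are below) =====
def Claim_equal_compute_values_py : Prop := ∀ (stopping_points : List Int), Dom_compute_values_py stopping_points → Spec_compute_values_py stopping_points (compute_values_py stopping_points)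

-- ===== LEMMAS AND PROOFS =====

-- A's loop body is exactly the Counter step
lemma pv_stepA_eq_counter_step :
    (fun (values : PySem.Dict Int Int) point =>
      if values.contains point then values.insert point (values.getD point 0 + 1)
      else values.insert point 1)
    = (fun (d : PySem.Dict Int Int) x => d.modify x 0 (· + 1)) := by
  funext d p
  by_cases h : d.contains p = true
  · simp [h, PySem.Dict.modify]
  · have h' : d.contains p = false := by simpa using h
    have h0 : d.getD p 0 = 0 := by
      simp [PySem.Dict.getD_of_not_contains, h']
    simp [h', PySem.Dict.modify, h0]

lemma pv_A_eq_counter_items (stopping_points : List Int) :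
    compute_values_py stopping_points
      = (PySem.Dict.counter (PySem.List.sorted stopping_points (fun x => x) false)).items := by
  unfold compute_values_py
  rw [pv_stepA_eq_counter_step]
  rfl

-- pvGroups of a sorted list is exactly (distinct elements in order, each with its count)
lemma pv_groups_eq :
    ∀ (n : Nat) (s : List Int), s.length ≤ n → s.Pairwise (· ≤ ·) →
      pvGroups s = (PySem.Set.ofList s).map (fun k => (k, (s.count k : Int)))
  | 0, s, hlen, _ => by
      have hs : s = [] := List.eq_nil_of_length_eq_zero (Nat.le_zero.mp hlen)
      subst hs; simp [pvGroups, PySem.Set.ofList_nil]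
  | n + 1, [], _, _ => by simp [pvGroups, PySem.Set.ofList_nil]
  | n + 1, x :: xs, hlen, hpair => by
      have hx : ∀ y ∈ xs, x ≤ y := (List.pairwise_cons.mp hpair).1
      have hxs : xs.Pairwise (· ≤ ·) := (List.pairwise_cons.mp hpair).2
      set t := xs.takeWhile (fun y => y == x) with ht
      set r := xs.dropWhile (fun y => y == x) with hr
      have htr : t ++ r = xs := List.takeWhile_append_dropWhile
      have ht_all : ∀ y ∈ t, y = x := by
        intro y hy
        have := List.mem_takeWhile_imp hy
        exact eq_of_beq this
      have hr_sub : List.Sublist r xs := List.dropWhile_sublist _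
      have hr_pair : r.Pairwise (· ≤ ·) := hxs.sublist hr_sub
      have hx_notin_r : x ∉ r := by
        intro hmem
        cases hR : r with
        | nil => rw [hR] at hmem; exact (List.not_mem_nil).elim hmem
        | cons y r' =>
          have hdw : List.dropWhile (fun y => y == x) xs = y :: r' := hr ▸ hR
          have hyx : ¬ ((y == x) = true) := by
            have := List.head_dropWhile_not (fun y => y == x) (l := xs)
              (by rw [hdw]; simp)
            simp only [hdw, List.head_cons] at this
            simp [this]
          have hyne : y ≠ x := fun h => hyx (by simp [h])
          have hxy : x < y := lt_of_le_of_ne (hx y (hr_sub.mem (by rw [hR]; simp))) (Ne.symm hyne)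
          rw [hR] at hmem
          rcases List.mem_cons.mp hmem with h | h
          · exact hyne h.symm
          · have hyr : y ≤ x := by
              have := (List.pairwise_cons.mp (hR ▸ hr_pair)).1
              exact this x h
            exact absurd hyr (not_le.mpr hxy)
      have hcount_t : t.count x = t.length :=
        List.count_eq_length.mpr (fun y hy => by simp [ht_all y hy])
      have hcount_r : r.count x = 0 := List.count_eq_zero.mpr hx_notin_r
      have hcount : xs.count x = t.length := by
        rw [← htr, List.count_append, hcount_t, hcount_r]
        omega
      -- distinct elements: Set.ofList (x :: xs) = x :: Set.ofList r
      have h_oft : PySem.Set.ofList (x :: t) = [x] := by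
        rw [PySem.Set.ofList_cons]
        have : PySem.Set.discard (PySem.Set.ofList t) x = [] := by
          refine List.eq_nil_iff_forall_not_mem.mpr (fun y hy => ?_)
          have h1 := (PySem.Set.mem_discard _ _ _).mp hy
          exact h1.2 (ht_all y ((PySem.Set.mem_ofList _ _).mp h1.1))
        rw [this]
      have h_ofl : PySem.Set.ofList (x :: xs) = x :: PySem.Set.ofList r := by
        have : (x :: xs) = (x :: t) ++ r := by rw [← htr]; rfl
        rw [this, PySem.Set.ofList_append, h_oft, PySem.Set.update_eq_append_filter]
        have hfilter :
            (PySem.Set.ofList r).filter (fun y => !(PySem.Set.contains [x] y)) =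
              PySem.Set.ofList r := by
          refine List.filter_eq_self.mpr (fun y hy => ?_)
          have hyr : y ∈ r := (PySem.Set.mem_ofList _ _).mp hy
          have hyx : y ≠ x := fun h => hx_notin_r (h ▸ hyr)
          simp [PySem.Set.contains, hyx]
        rw [hfilter]
        rfl
      have hcnt_r : ∀ k ∈ PySem.Set.ofList r, (x :: xs).count k = r.count k := by
        intro k hk
        have hkr : k ∈ r := (PySem.Set.mem_ofList _ _).mp hk
        have hkx : k ≠ x := fun h => hx_notin_r (h ▸ hkr)
        have hkt : t.count k = 0 :=
          List.count_eq_zero.mpr (fun hmem => hkx (ht_all k hmem))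
        rw [List.count_cons, ← htr, List.count_append, hkt]
        simp [Ne.symm hkx]
      have hIH : pvGroups r = (PySem.Set.ofList r).map (fun k => (k, (r.count k : Int))) := by
        refine pv_groups_eq n r ?_ hr_pair
        have h1 : r.length ≤ xs.length := List.length_dropWhile_le _ _
        have h2 : xs.length ≤ n := Nat.lt_succ_iff.mp (by simpa using hlen)
        exact le_trans h1 h2
      have hhead : ((x : Int), (1 + (t.length : Int)))
          = ((x : Int), (((x :: xs).count x : Nat) : Int)) := by
        rw [List.count_cons_self, hcount]
        simp [Int.add_comm]
      calc pvGroups (x :: xs)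
          = (x, 1 + (t.length : Int)) :: pvGroups r := by
            rw [pvGroups]
        _ = (x, (((x :: xs).count x : Nat) : Int)) ::
              (PySem.Set.ofList r).map (fun k => (k, (r.count k : Int))) := by
            rw [hIH, hhead]
        _ = (x, (((x :: xs).count x : Nat) : Int)) ::
              (PySem.Set.ofList r).map (fun k => (k, ((x :: xs).count k : Int))) := by
            congr 1
            exact (List.map_congr_left (fun k hk => by rw [hcnt_r k hk])).symm
        _ = (PySem.Set.ofList (x :: xs)).map (fun k => (k, ((x :: xs).count k : Int))) := by
            rw [h_ofl]; rfl

-- ===== VERDICT (by name: the statement is the Claim_ definition above) =====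
theorem compute_values_py_spec : Claim_equal_compute_values_py := by
  intro stopping_points _
  unfold Spec_compute_values_py compute_values_py_alt
  rw [pv_A_eq_counter_items, PySem.Dict.items_counter]
  exact (pv_groups_eq (PySem.List.sorted stopping_points (fun x => x) false).length _
    le_rfl (PySem.List.sorted_pairwise _ _)).symm
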